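-- pv_equiv track=rewrite | github.com/viktorsobol/raft_loading_research | results_processor/calculate_pbs.py | filter_to_the_most_recent_version_avaliability
-- ===== SOURCE A (Python) =====
-- def filter_to_the_most_recent_version_avaliability(data: list) -> dict:
--     result = {}
--     for d in data:
--         observed_time = d['time']
--         if d['version'] in result:
--             result[d['version']] = min(result[d['version']], observed_time)
--         else:
--             result[d['version']] = observed_time
--
--     return result
-- ===== SOURCE B (Python) =====
-- def filter_to_the_most_recent_version_avaliability(data: list) -> dict:
--     # Dict-free alternative: extract (time, version) pairs, record versions in
--     # first-seen order, then compute each version's min by scanning the pairs.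
--     pairs = [(d['time'], d['version']) for d in data]
--     order = []
--     for _, v in pairs:
--         if v not in order:
--             order.append(v)
--     return {v: min(t for t, vv in pairs if vv == v) for v in order}
-- ===== Notes on version B (the rewrite author's own statement) =====
-- stated objective: alternative
-- what changed: Drops the running-minimum dict entirely: B extracts a flat (time, version) pair list, builds an explicit first-seen order list of versions, and computes each version's minimum by a per-version scan of the pair list.
import Mathlib
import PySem

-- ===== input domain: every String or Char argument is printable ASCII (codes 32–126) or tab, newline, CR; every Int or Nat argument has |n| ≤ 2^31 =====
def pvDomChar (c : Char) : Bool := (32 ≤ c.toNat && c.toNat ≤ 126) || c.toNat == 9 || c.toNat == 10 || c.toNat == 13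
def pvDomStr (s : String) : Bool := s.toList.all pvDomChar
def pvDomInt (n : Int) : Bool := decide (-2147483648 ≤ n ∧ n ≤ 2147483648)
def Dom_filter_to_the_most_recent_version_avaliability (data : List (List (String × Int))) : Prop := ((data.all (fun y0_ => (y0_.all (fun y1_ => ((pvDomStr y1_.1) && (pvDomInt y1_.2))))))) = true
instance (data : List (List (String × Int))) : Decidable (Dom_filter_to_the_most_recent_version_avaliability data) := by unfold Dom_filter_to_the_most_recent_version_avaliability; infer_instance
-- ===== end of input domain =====

-- B drops A's running-minimum dict for a pair-extraction pass, a first-seen order list and a per-version min scan; return values proved equal on Pre_.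

-- ===== PORT A =====
-- A's loop: running minimum per version in a dict; `none` = KeyError on d['time'] / d['version'] (read in that order).
def pvLoopA : List (List (String × Int)) → PySem.Dict Int Int → Option (PySem.Dict Int Int)
  | [], r => some r
  | d :: rest, r =>
    match List.lookup "time" d with
    | none => none
    | some t =>
      match List.lookup "version" d with
      | none => none
      | some v =>
        if r.contains v then pvLoopA rest (r.insert v (min (r.getD v 0) t))
        else pvLoopA rest (r.insert v t)

def filter_to_the_most_recent_version_avaliability (data : List (List (String × Int))) : List (Int × Int) :=
  match pvLoopA data PySem.Dict.empty with
  | some r => r.items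
  | none => []  -- unreachable under Pre_ (Python raises KeyError here)

-- ===== PORT B =====
-- B's comprehension `[(d['time'], d['version']) for d in data]`; `none` = KeyError (time read first).
def pvPairs : List (List (String × Int)) → Option (List (Int × Int))
  | [] => some []
  | d :: rest =>
    match List.lookup "time" d with
    | none => none
    | some t =>
      match List.lookup "version" d with
      | none => none
      | some v => (pvPairs rest).map (fun ps => (t, v) :: ps)

-- B's `order` loop: versions in first-seen order.
def pvOrder (ps : List (Int × Int)) : List Int :=
  ps.foldl (fun acc p => if p.2 ∈ acc then acc else acc ++ [p.2]) []

-- `(t for t, vv in pairs if vv == v)`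
def pvTimesOf (ps : List (Int × Int)) (v : Int) : List Int :=
  ps.filterMap (fun p => if p.2 == v then some p.1 else none)

-- Python's min on a nonempty list of ints (default 0 never used: each version in `order` occurs in `pairs`).
def pvMinVal (ts : List Int) : Int := (PySem.List.min? ts (fun x => x)).getD 0

def filter_to_the_most_recent_version_avaliability_alt (data : List (List (String × Int))) : List (Int × Int) :=
  match pvPairs data with
  | some ps => (pvOrder ps).map (fun v => (v, pvMinVal (pvTimesOf ps v)))
  | none => []  -- unreachable under Pre_ (Python raises KeyError here)

-- ===== PRECONDITION & SPEC =====
-- Pre_ excludes exactly the inputs where Python A raises KeyError: some dict lacks key "time" or "version".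
def Pre_filter_to_the_most_recent_version_avaliability (data : List (List (String × Int))) : Prop :=
  ∀ d ∈ data, "time" ∈ d.map Prod.fst ∧ "version" ∈ d.map Prod.fst
instance (data : List (List (String × Int))) : Decidable (Pre_filter_to_the_most_recent_version_avaliability data) := by unfold Pre_filter_to_the_most_recent_version_avaliability; infer_instance

def pvWitness_filter_to_the_most_recent_version_avaliability : (List (List (String × Int))) :=
  [[("time", 3), ("version", 1)], [("time", 2), ("version", 1)], [("time", 5), ("version", 2)]]

def Spec_filter_to_the_most_recent_version_avaliability (data : List (List (String × Int))) (out : List (Int × Int)) : Prop := out = filter_to_the_most_recent_version_avaliability_alt data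
instance (data : List (List (String × Int))) (out : List (Int × Int)) : Decidable (Spec_filter_to_the_most_recent_version_avaliability data out) := by unfold Spec_filter_to_the_most_recent_version_avaliability; infer_instance

-- ===== CLAIM (what is proved, stated in full; the proofs are below) =====
def Claim_equal_filter_to_the_most_recent_version_avaliability : Prop := ∀ (data : List (List (String × Int))), Dom_filter_to_the_most_recent_version_avaliability data → Pre_filter_to_the_most_recent_version_avaliability data → Spec_filter_to_the_most_recent_version_avaliability data (filter_to_the_most_recent_version_avaliability data)

-- ===== LEMMAS AND PROOFS =====

-- A's loop body as a pure step over an extracted (time, version) pair.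
def pvStepA (r : PySem.Dict Int Int) (p : Int × Int) : PySem.Dict Int Int :=
  if r.contains p.2 then r.insert p.2 (min (r.getD p.2 0) p.1) else r.insert p.2 p.1

-- A's loop is the fold of pvStepA over the same extracted pairs (same KeyErrors).
lemma pvLoopA_eq_pairs (data : List (List (String × Int))) (r : PySem.Dict Int Int) :
    pvLoopA data r = (pvPairs data).map (fun ps => ps.foldl pvStepA r) := by
  induction data generalizing r with
  | nil => rfl
  | cons d rest ih =>
    rw [pvLoopA, pvPairs]
    cases List.lookup "time" d with
    | none => rfl
    | some t =>
      cases List.lookup "version" d with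
      | none => rfl
      | some v =>
        dsimp only
        by_cases hc : r.contains v = true
        · rw [if_pos hc, ih]
          cases pvPairs rest <;> simp [pvStepA, hc]
        · rw [if_neg hc, ih]
          cases pvPairs rest <;> simp [pvStepA, hc]

lemma pvOrder_aux_mem (ps : List (Int × Int)) (acc : List Int) (v : Int) :
    v ∈ ps.foldl (fun acc p => if p.2 ∈ acc then acc else acc ++ [p.2]) acc ↔
      v ∈ acc ∨ v ∈ ps.map Prod.snd := by
  induction ps generalizing acc with
  | nil => simp
  | cons p rest ih =>
    rw [List.foldl_cons]
    by_cases h : p.2 ∈ acc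
    · rw [if_pos h, ih]
      constructor
      · rintro (h1 | h1)
        · exact Or.inl h1
        · exact Or.inr (by simp [h1])
      · rintro (h1 | h1)
        · exact Or.inl h1
        · rcases List.mem_map.mp h1 with ⟨q, hq, rfl⟩
          rcases List.mem_cons.mp hq with rfl | hq'
          · exact Or.inl h
          · exact Or.inr (List.mem_map.mpr ⟨q, hq', rfl⟩)
    · rw [if_neg h, ih]
      simp only [List.mem_append, List.map_cons, List.mem_cons]
      tauto

lemma mem_pvOrder (ps : List (Int × Int)) (v : Int) :
    v ∈ pvOrder ps ↔ v ∈ ps.map Prod.snd := by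
  rw [pvOrder, pvOrder_aux_mem]; simp

lemma pvOrder_aux_nodup (ps : List (Int × Int)) (acc : List Int) (h : acc.Nodup) :
    (ps.foldl (fun acc p => if p.2 ∈ acc then acc else acc ++ [p.2]) acc).Nodup := by
  induction ps generalizing acc with
  | nil => exact h
  | cons p rest ih =>
    rw [List.foldl_cons]
    by_cases hm : p.2 ∈ acc
    · rw [if_pos hm]; exact ih acc h
    · rw [if_neg hm]
      refine ih _ ?_
      rw [List.nodup_append]
      refine ⟨h, List.nodup_singleton _, ?_⟩
      intro a ha b hb
      rw [List.mem_singleton] at hb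
      subst hb
      exact fun he => hm (he ▸ ha)

lemma nodup_pvOrder (ps : List (Int × Int)) : (pvOrder ps).Nodup :=
  pvOrder_aux_nodup ps [] List.nodup_nil

lemma pvOrder_snoc (ps : List (Int × Int)) (p : Int × Int) :
    pvOrder (ps ++ [p]) =
      if p.2 ∈ pvOrder ps then pvOrder ps else pvOrder ps ++ [p.2] := by
  rw [pvOrder, List.foldl_append]; rfl

lemma pvTimesOf_snoc (ps : List (Int × Int)) (p : Int × Int) (v : Int) :
    pvTimesOf (ps ++ [p]) v =
      pvTimesOf ps v ++ (if p.2 == v then [p.1] else []) := by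
  rw [pvTimesOf, pvTimesOf, List.filterMap_append]
  congr 1
  by_cases h : (p.2 == v) = true <;> simp [List.filterMap, h]

lemma pvTimesOf_ne_nil (ps : List (Int × Int)) (v : Int) (h : v ∈ ps.map Prod.snd) :
    pvTimesOf ps v ≠ [] := by
  rcases List.mem_map.mp h with ⟨q, hq, rfl⟩
  intro hnil
  have : q.1 ∈ pvTimesOf ps q.2 :=
    List.mem_filterMap.mpr ⟨q, hq, by simp⟩
  rw [hnil] at this
  exact absurd this (List.not_mem_nil)

lemma pvTimesOf_nil_of_not_mem (ps : List (Int × Int)) (v : Int)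
    (h : v ∉ ps.map Prod.snd) : pvTimesOf ps v = [] := by
  rw [pvTimesOf, List.filterMap_eq_nil_iff]
  intro p hp
  have : p.2 ≠ v := fun he => h (List.mem_map.mpr ⟨p, hp, he⟩)
  simp [this]

lemma pvMinVal_append (ts : List Int) (t : Int) (h : ts ≠ []) :
    pvMinVal (ts ++ [t]) = min (pvMinVal ts) t := by
  cases ts with
  | nil => exact absurd rfl h
  | cons x xs =>
    rw [List.cons_append, pvMinVal, pvMinVal, PySem.List.min?_id_cons, PySem.List.min?_id_cons]
    simp [List.foldl_append]

-- Core: the A-fold's items are exactly B's order/min table.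
lemma pvFoldA_items (ps : List (Int × Int)) :
    (ps.foldl pvStepA PySem.Dict.empty).items
      = (pvOrder ps).map (fun v => (v, pvMinVal (pvTimesOf ps v))) := by
  induction ps using List.reverseRecOn with
  | nil => rfl
  | append_singleton ps p ih =>
    have hkeys : (ps.foldl pvStepA PySem.Dict.empty).keys = pvOrder ps := by
      simp [PySem.Dict.keys, ih, Function.comp_def]
    have hnd : (ps.foldl pvStepA PySem.Dict.empty).keys.Nodup := by
      rw [hkeys]; exact nodup_pvOrder ps
    have hcont : (ps.foldl pvStepA PySem.Dict.empty).contains p.2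
        = decide (p.2 ∈ pvOrder ps) := by
      rw [PySem.Dict.contains_eq_decide_mem_keys, hkeys]
    rw [List.foldl_append, List.foldl_cons, List.foldl_nil, pvStepA, hcont, pvOrder_snoc]
    by_cases hm : p.2 ∈ pvOrder ps
    · rw [if_pos (by simpa using hm), if_pos hm]
      have hget : (ps.foldl pvStepA PySem.Dict.empty).getD p.2 0
          = pvMinVal (pvTimesOf ps p.2) := by
        apply PySem.Dict.getD_of_mem_items _ _ hnd
        rw [ih]
        exact List.mem_map.mpr ⟨p.2, hm, rfl⟩
      rw [PySem.Dict.items_insert_of_contains _ _ (by rw [hcont]; simpa using hm),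
        ih, List.map_map]
      apply List.map_congr_left
      intro v hv
      by_cases hvp : v = p.2
      · subst hvp
        simp only [Function.comp, beq_self_eq_true, if_true]
        rw [pvTimesOf_snoc, hget]
        simp only [beq_self_eq_true, if_true]
        rw [pvMinVal_append _ _ (pvTimesOf_ne_nil ps p.2 ((mem_pvOrder ps p.2).mp hv))]
      · have hne : (v == p.2) = false := beq_eq_false_iff_ne.mpr hvp
        simp only [Function.comp, hne, Bool.false_eq_true, if_false]
        rw [pvTimesOf_snoc]
        have : (p.2 == v) = false := beq_eq_false_iff_ne.mpr (fun h => hvp h.symm)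
        simp [this]
    · rw [if_neg (by simpa using hm), if_neg hm]
      rw [PySem.Dict.items_insert_of_not_contains _ _ (by rw [hcont]; simpa using hm),
        ih, List.map_append]
      congr 1
      · apply List.map_congr_left
        intro v hv
        rw [pvTimesOf_snoc]
        have hvp : v ≠ p.2 := fun h => hm (h ▸ hv)
        have : (p.2 == v) = false := beq_eq_false_iff_ne.mpr (fun h => hvp h.symm)
        simp [this]
      · rw [List.map_singleton, pvTimesOf_snoc,
          pvTimesOf_nil_of_not_mem ps p.2 (fun h => hm ((mem_pvOrder ps p.2).mpr h))]
        simp [pvMinVal, PySem.List.min?_id_cons]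

-- ===== VERDICT (by name: the statement is the Claim_ definition above) =====
theorem filter_to_the_most_recent_version_avaliability_spec : Claim_equal_filter_to_the_most_recent_version_avaliability := by
  intro data _hdom _hpre
  unfold Spec_filter_to_the_most_recent_version_avaliability
  unfold filter_to_the_most_recent_version_avaliability filter_to_the_most_recent_version_avaliability_alt
  rw [pvLoopA_eq_pairs]
  cases pvPairs data with
  | none => rfl
  | some ps => simpa using pvFoldA_items ps
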